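-- pv_equiv track=rewrite | github.com/veops/cmdb | cmdb-api/api/lib/cmdb/search/ci/db/search.py | _extra_handle_query_expr
-- ===== SOURCE A (Python) =====
-- def _extra_handle_query_expr(args):  # \, or ,
--     result = []
--     if args:
--         result.append(args[0])
--
--     for arg in args[1:]:
--         if result[-1].endswith('\\'):
--             result[-1] = ",".join([result[-1].rstrip('\\'), arg])
--         # elif ":" not in arg:
--         #     result[-1] = ",".join([result[-1], arg])
--         else:
--             result.append(arg)
--
--     return result
-- ===== SOURCE B (Python) =====
-- def _extra_handle_query_expr(args):  # \, or ,
--     if not args: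
--         return []
--     result = []
--     cur = [args[0]]
--     for arg in args[1:]:
--         if cur[-1].endswith('\\'):
--             cur[-1] = cur[-1].rstrip('\\')
--             cur.append(arg)
--         else:
--             result.append(','.join(cur))
--             cur = [arg]
--     result.append(','.join(cur))
--     return result
-- ===== Notes on version B (the rewrite author's own statement) =====
-- stated objective: alternative
-- what changed: B buffers each backslash-continued group in a list and joins it once on flush, instead of A's repeated rstrip+join rebuild of the growing result[-1] string at every merged element.
import Mathlib
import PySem

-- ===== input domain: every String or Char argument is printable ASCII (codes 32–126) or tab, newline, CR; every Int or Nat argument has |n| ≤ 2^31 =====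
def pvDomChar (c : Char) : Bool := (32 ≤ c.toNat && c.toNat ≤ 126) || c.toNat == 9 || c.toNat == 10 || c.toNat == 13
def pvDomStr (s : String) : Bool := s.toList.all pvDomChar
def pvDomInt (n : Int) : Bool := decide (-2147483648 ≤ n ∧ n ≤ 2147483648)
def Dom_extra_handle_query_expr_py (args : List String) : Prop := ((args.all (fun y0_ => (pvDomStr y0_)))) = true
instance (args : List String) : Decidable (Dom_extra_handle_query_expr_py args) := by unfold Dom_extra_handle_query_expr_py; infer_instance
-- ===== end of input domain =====

-- B buffers each backslash-continued group in a list and joins it once on flush, instead of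
-- A's repeated rstrip+join rebuild of the growing result[-1] string (objective: alternative).


-- ===== PORT A =====
-- s.rstrip('\\') : drop all trailing backslashes (exact by hand; PySem has no chars-argument rstrip)
def pyRstripBS (s : String) : String :=
  String.ofList ((s.toList.reverse.dropWhile (· == '\\')).reverse)

def extra_handle_query_expr_py (args : List String) : List String :=
  match args with
  | [] => []
  | a0 :: rest =>
      rest.foldl (fun result arg =>
        if PySem.Str.endswith (result.getLast?.getD "") "\\" then
          result.dropLast ++ [PySem.Str.join "," [pyRstripBS (result.getLast?.getD ""), arg]]
        else
          result ++ [arg]) [a0]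

-- ===== PORT B =====
-- the loop of Source B: `result` holds finished groups, `cur` the pending fragment buffer
def altLoop (result cur : List String) : List String → List String
  | [] => result ++ [PySem.Str.join "," cur]
  | arg :: rest =>
      if PySem.Str.endswith (cur.getLast?.getD "") "\\" then
        altLoop result (cur.dropLast ++ [pyRstripBS (cur.getLast?.getD ""), arg]) rest
      else
        altLoop (result ++ [PySem.Str.join "," cur]) [arg] rest

def extra_handle_query_expr_py_alt (args : List String) : List String :=
  match args with
  | [] => []
  | a0 :: rest => altLoop [] [a0] rest

-- ===== PRECONDITION & SPEC =====
def Spec_extra_handle_query_expr_py (args : List String) (out : List String) : Prop := out = extra_handle_query_expr_py_alt args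
instance (args : List String) (out : List String) : Decidable (Spec_extra_handle_query_expr_py args out) := by unfold Spec_extra_handle_query_expr_py; infer_instance

-- ===== CLAIM (what is proved, stated in full; the proofs are below) =====
def Claim_equal_extra_handle_query_expr_py : Prop := ∀ (args : List String), Dom_extra_handle_query_expr_py args → Spec_extra_handle_query_expr_py args (extra_handle_query_expr_py args)

-- ===== LEMMAS AND PROOFS =====

-- char-level rstrip
def rstripBSc (cs : List Char) : List Char := (cs.reverse.dropWhile (· == '\\')).reverse

lemma pyRstripBS_toList (s : String) : (pyRstripBS s).toList = rstripBSc s.toList := by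
  simp [pyRstripBS, rstripBSc]

-- a one-char suffix is the last character
lemma singleton_suffix_iff (x : Char) (l : List Char) : [x] <:+ l ↔ l.getLast? = some x := by
  constructor
  · rintro ⟨t, rfl⟩; simp
  · intro h
    rcases l.eq_nil_or_concat with rfl | ⟨t, b, rfl⟩
    · simp at h
    · simp at h; exact ⟨t, by simp [h]⟩

lemma endswith_bs (cs : List Char) : PySem.Chars.endswith cs ['\\'] = (cs.getLast? == some '\\') := by
  rw [Bool.eq_iff_iff, PySem.Chars.endswith_iff, singleton_suffix_iff]
  simp

-- rstripping stops at a comma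
lemma rstripBSc_append_comma (xs ys : List Char) :
    rstripBSc (xs ++ ',' :: ys) = xs ++ ',' :: rstripBSc ys := by
  simp only [rstripBSc, List.reverse_append, List.reverse_cons]
  rw [List.append_assoc, List.dropWhile_append]
  split_ifs with h
  · rw [List.isEmpty_iff] at h
    rw [List.singleton_append, List.dropWhile_cons]
    simp [h]
  · simp

-- joins: snoc form
lemma join_snoc (sep a : List Char) (x : List Char) (l : List (List Char)) :
    PySem.Chars.join sep ((x :: l) ++ [a]) = PySem.Chars.join sep (x :: l) ++ sep ++ a := by
  induction l generalizing x with
  | nil => simp [PySem.Chars.join_cons_cons, PySem.Chars.join_singleton]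
  | cons y l ih =>
      have hih := ih y
      simp only [List.cons_append] at hih ⊢
      rw [PySem.Chars.join_cons_cons, hih, PySem.Chars.join_cons_cons]
      simp [List.append_assoc]

lemma join_snoc' (sep a : List Char) (L : List (List Char)) (h : L ≠ []) :
    PySem.Chars.join sep (L ++ [a]) = PySem.Chars.join sep L ++ sep ++ a := by
  cases L with
  | nil => exact absurd rfl h
  | cons x l => exact join_snoc sep a x l

lemma join_toList (cur : List String) :
    (PySem.Str.join "," cur).toList = PySem.Chars.join [','] (cur.map String.toList) := by
  rw [PySem.Str.toList_join]; rfl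

-- the last fragment of a joined group decides endswith('\')
lemma endswith_join (cur : List String) (last : String) :
    PySem.Str.endswith (PySem.Str.join "," (cur ++ [last])) "\\" = PySem.Str.endswith last "\\" := by
  rw [PySem.Str.endswith_eq, PySem.Str.endswith_eq, join_toList]
  show PySem.Chars.endswith _ ['\\'] = PySem.Chars.endswith _ ['\\']
  rw [endswith_bs, endswith_bs]
  cases cur with
  | nil => simp [PySem.Chars.join_singleton]
  | cons x c =>
      rw [List.map_append, show List.map String.toList [last] = [last.toList] from rfl,
        join_snoc' _ _ _ (by simp)]
      rw [List.append_assoc, List.getLast?_append]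
      rcases last.toList.eq_nil_or_concat with h' | ⟨t, b, h'⟩
      · rw [h']; simp
      · rw [h']
        have hb : (',' :: (t ++ [b])).getLast? = some b := by
          rw [show ',' :: (t ++ [b]) = (',' :: t) ++ [b] by simp, List.getLast?_concat]
        simp [hb]

-- rstripping the join is joining with the last fragment rstripped
lemma rstrip_join (cur : List String) (last : String) :
    pyRstripBS (PySem.Str.join "," (cur ++ [last])) = PySem.Str.join "," (cur ++ [pyRstripBS last]) := by
  rw [← String.toList_inj, pyRstripBS_toList, join_toList, join_toList]
  cases cur with
  | nil => simp [PySem.Chars.join_singleton, pyRstripBS_toList]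
  | cons x c =>
      rw [List.map_append, List.map_append,
        show List.map String.toList [last] = [last.toList] from rfl,
        show List.map String.toList [pyRstripBS last] = [(pyRstripBS last).toList] from rfl,
        join_snoc' _ _ _ (by simp), join_snoc' _ _ _ (by simp)]
      rw [List.append_assoc, List.singleton_append, rstripBSc_append_comma]
      simp [pyRstripBS_toList, List.append_assoc]

-- joining a single fragment is the fragment
lemma join_single (a : String) : PySem.Str.join "," [a] = a := by
  rw [← String.toList_inj, join_toList]
  simp [PySem.Chars.join_singleton]

-- A's inner join of [rstripped joined group, arg] is B's whole-group join
lemma join_step (cur : List String) (last arg : String) :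
    PySem.Str.join "," [pyRstripBS (PySem.Str.join "," (cur ++ [last])), arg]
      = PySem.Str.join "," ((cur ++ [pyRstripBS last]) ++ [arg]) := by
  rw [rstrip_join, ← String.toList_inj, join_toList, join_toList]
  rw [show List.map String.toList [PySem.Str.join "," (cur ++ [pyRstripBS last]), arg]
      = [(PySem.Str.join "," (cur ++ [pyRstripBS last])).toList, arg.toList] from rfl]
  rw [PySem.Chars.join_cons_cons, PySem.Chars.join_singleton, join_toList]
  rw [show List.map String.toList ((cur ++ [pyRstripBS last]) ++ [arg])
      = List.map String.toList (cur ++ [pyRstripBS last]) ++ [arg.toList] by simp]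
  rw [join_snoc' _ _ _ (by simp)]

-- main invariant: A's folded state is B's finished groups plus the joined pending buffer
lemma main_inv (rest : List String) : ∀ (result cur : List String) (last : String),
    rest.foldl (fun result arg =>
        if PySem.Str.endswith (result.getLast?.getD "") "\\" then
          result.dropLast ++ [PySem.Str.join "," [pyRstripBS (result.getLast?.getD ""), arg]]
        else
          result ++ [arg]) (result ++ [PySem.Str.join "," (cur ++ [last])])
      = altLoop result (cur ++ [last]) rest := by
  induction rest with
  | nil => intro result cur last; simp [altLoop]
  | cons arg rest ih =>
      intro result cur last
      simp only [List.foldl_cons, altLoop]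
      have hg : ((result ++ [PySem.Str.join "," (cur ++ [last])]).getLast?).getD ""
          = PySem.Str.join "," (cur ++ [last]) := by simp
      have hg2 : ((cur ++ [last]).getLast?).getD "" = last := by simp
      rw [hg, hg2, endswith_join]
      by_cases h : PySem.Str.endswith last "\\" = true
      · rw [if_pos h, if_pos h, List.dropLast_concat, List.dropLast_concat, join_step]
        have := ih result (cur ++ [pyRstripBS last]) arg
        simpa using this
      · rw [if_neg h, if_neg h]
        have := ih (result ++ [PySem.Str.join "," (cur ++ [last])]) [] arg
        simpa [join_single] using this

-- ===== VERDICT (by name: the statement is the Claim_ definition above) =====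
theorem extra_handle_query_expr_py_spec : Claim_equal_extra_handle_query_expr_py := by
  intro args _
  unfold Spec_extra_handle_query_expr_py extra_handle_query_expr_py extra_handle_query_expr_py_alt
  cases args with
  | nil => rfl
  | cons a0 rest =>
      have := main_inv rest [] [] a0
      simpa [join_single] using this
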